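-- pv_equiv track=rewrite | github.com/kgukevin/tjhsst | Artificial Intelligence I & II (2018-19)/Labs/Lab6 NQueens/NQueens.py | get_most_constrained_var
-- ===== SOURCE A (Python) =====
-- def get_next_unassigned_var(state):
--     for x in range(0, len(state)):
--         if state[x] == -1:
--             return x
--     return None
--
-- def get_most_constrained_var(state):
--     open = len(state)
--     index = get_next_unassigned_var(state)
--     for x in range(0, len(state)):
--         if state[x] == -1:
--             vals = get_sorted_values(state, x)
--             if open > len(vals):
--                 open = len(vals)
--                 index = x
--     return index
--
-- def get_sorted_values(state, var):
--     values = {num for num in range(0, len(state))}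
--     for x in range(0, len(state)):
--         if state[x] != -1:
--             if state[x] in values:
--                 values.remove(state[x])
--             target = state[x]
--             if target + (var - x) in values:
--                 values.remove(target + (var - x))
--             if target - (var - x) in values:
--                 values.remove(target - (var - x))
--     return values
-- ===== SOURCE B (Python) =====
-- def get_most_constrained_var(state):
--     n = len(state)
--     cols = {state[x] for x in range(n) if state[x] != -1}
--     diag = {state[x] - x for x in range(n) if state[x] != -1}
--     anti = {state[x] + x for x in range(n) if state[x] != -1}
--     best = n
--     index = None
--     for var in range(n):
--         if state[var] == -1:
--             if index is None:
--                 index = var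
--             cnt = sum(1 for num in range(n)
--                       if num not in cols
--                       and num - var not in diag
--                       and num + var not in anti)
--             if best > cnt:
--                 best = cnt
--                 index = var
--     return index
-- ===== Notes on version B (the rewrite author's own statement) =====
-- stated objective: alternative
-- what changed: Instead of recomputing a full legal-value set (with three conditional removals per assigned queen) for every unassigned variable, B builds the column/diagonal/anti-diagonal index sets once from the assigned positions and then counts legal values per variable with three membership tests, folding the first-unassigned initialisation into the single scan.
import Mathlib
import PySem

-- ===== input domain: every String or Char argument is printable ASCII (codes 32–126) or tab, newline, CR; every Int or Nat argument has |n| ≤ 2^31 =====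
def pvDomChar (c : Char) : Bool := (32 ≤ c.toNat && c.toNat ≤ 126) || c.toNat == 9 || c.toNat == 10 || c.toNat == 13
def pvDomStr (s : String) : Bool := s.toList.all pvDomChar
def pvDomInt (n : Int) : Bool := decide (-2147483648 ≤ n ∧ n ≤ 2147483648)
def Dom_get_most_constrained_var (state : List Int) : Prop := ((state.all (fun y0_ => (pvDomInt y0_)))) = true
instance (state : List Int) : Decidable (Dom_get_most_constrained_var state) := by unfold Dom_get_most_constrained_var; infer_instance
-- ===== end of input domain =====

-- B builds the column/diagonal/anti-diagonal index sets once from the assigned queens and counts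
-- legal values per unassigned variable by three membership tests, instead of A's per-variable
-- rebuild of the whole legal-value set with conditional removals (objective: alternative algorithm).

-- ===== PORT A =====
-- for x in range(0, len(state)): if state[x] == -1: return x   / return None
def pvGnuvLoop (state : List Int) : List Int → Option Int
  | [] => none
  | x :: rest => if PySem.List.pyGetD state x 0 = -1 then some x else pvGnuvLoop state rest

def get_next_unassigned_var (state : List Int) : Option Int :=
  pvGnuvLoop state (PySem.List.pyRange 0 (state.length : Int) 1)

-- 'if v in values: values.remove(v)' is exactly PySem.Set.discard.
def get_sorted_values (state : List Int) (var : Int) : PySem.Set Int :=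
  (PySem.List.pyRange 0 (state.length : Int) 1).foldl
    (fun values x =>
      if PySem.List.pyGetD state x 0 ≠ -1 then
        let target := PySem.List.pyGetD state x 0
        let values := PySem.Set.discard values target
        let values := PySem.Set.discard values (target + (var - x))
        PySem.Set.discard values (target - (var - x))
      else values)
    (PySem.Set.ofList (PySem.List.pyRange 0 (state.length : Int) 1))

def get_most_constrained_var (state : List Int) : Option Int :=
  ((PySem.List.pyRange 0 (state.length : Int) 1).foldl
    (fun (acc : Int × Option Int) x =>
      if PySem.List.pyGetD state x 0 = -1 then
        let vals := get_sorted_values state x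
        if acc.1 > (PySem.Set.len vals : Int) then ((PySem.Set.len vals : Int), some x)
        else acc
      else acc)
    ((state.length : Int), get_next_unassigned_var state)).2

-- ===== PORT B =====
def pvAssigned (state : List Int) : List Int :=
  (PySem.List.pyRange 0 (state.length : Int) 1).filter
    (fun x => PySem.List.pyGetD state x 0 ≠ -1)

def get_most_constrained_var_alt (state : List Int) : Option Int :=
  let rng := PySem.List.pyRange 0 (state.length : Int) 1
  let cols := PySem.Set.ofList ((pvAssigned state).map (fun x => PySem.List.pyGetD state x 0))
  let diag := PySem.Set.ofList ((pvAssigned state).map (fun x => PySem.List.pyGetD state x 0 - x))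
  let anti := PySem.Set.ofList ((pvAssigned state).map (fun x => PySem.List.pyGetD state x 0 + x))
  (rng.foldl
    (fun (acc : Int × Option Int) v =>
      if PySem.List.pyGetD state v 0 = -1 then
        let idx := if acc.2 = none then some v else acc.2
        let cnt : Int := rng.countP (fun num =>
          !(PySem.Set.contains cols num) && !(PySem.Set.contains diag (num - v)) &&
          !(PySem.Set.contains anti (num + v)))
        if acc.1 > cnt then (cnt, some v) else (acc.1, idx)
      else acc)
    ((state.length : Int), none)).2

-- ===== PRECONDITION & SPEC =====
def Spec_get_most_constrained_var (state : List Int) (out : Option Int) : Prop := out = get_most_constrained_var_alt state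
instance (state : List Int) (out : Option Int) : Decidable (Spec_get_most_constrained_var state out) := by unfold Spec_get_most_constrained_var; infer_instance

-- ===== CLAIM (what is proved, stated in full; the proofs are below) =====
def Claim_equal_get_most_constrained_var : Prop := ∀ (state : List Int), Dom_get_most_constrained_var state → Spec_get_most_constrained_var state (get_most_constrained_var state)

-- ===== LEMMAS AND PROOFS =====

-- 'x is removed for variable var by assigned index i' (the three discards of A).
def pvHit (state : List Int) (var i y : Int) : Prop :=
  PySem.List.pyGetD state i 0 ≠ -1 ∧
    (y = PySem.List.pyGetD state i 0 ∨
     y = PySem.List.pyGetD state i 0 + (var - i) ∨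
     y = PySem.List.pyGetD state i 0 - (var - i))

lemma pvFold_nodup (state : List Int) (var : Int) (L : List Int) (s : PySem.Set Int)
    (hs : s.Nodup) :
    (L.foldl (fun values x =>
      if PySem.List.pyGetD state x 0 ≠ -1 then
        let target := PySem.List.pyGetD state x 0
        let values := PySem.Set.discard values target
        let values := PySem.Set.discard values (target + (var - x))
        PySem.Set.discard values (target - (var - x))
      else values) s).Nodup := by
  induction L generalizing s with
  | nil => simpa using hs
  | cons x L ih =>
    simp only [List.foldl_cons]
    apply ih
    split
    · exact PySem.Set.nodup_discard _ _ (PySem.Set.nodup_discard _ _ (PySem.Set.nodup_discard _ _ hs))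
    · exact hs

lemma pvFold_mem (state : List Int) (var : Int) (L : List Int) (s : PySem.Set Int) (y : Int) :
    y ∈ (L.foldl (fun values x =>
      if PySem.List.pyGetD state x 0 ≠ -1 then
        let target := PySem.List.pyGetD state x 0
        let values := PySem.Set.discard values target
        let values := PySem.Set.discard values (target + (var - x))
        PySem.Set.discard values (target - (var - x))
      else values) s) ↔ y ∈ s ∧ ∀ i ∈ L, ¬ pvHit state var i y := by
  induction L generalizing s with
  | nil => simp
  | cons x L ih =>
    simp only [List.foldl_cons]
    by_cases h : PySem.List.pyGetD state x 0 ≠ -1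
    · rw [if_pos h, ih]
      simp only [PySem.Set.mem_discard, pvHit, List.mem_cons]
      constructor
      · rintro ⟨⟨⟨⟨hy, h1⟩, h2⟩, h3⟩, h4⟩
        refine ⟨hy, ?_⟩
        rintro i (rfl | hi)
        · rintro ⟨-, (e | e | e)⟩
          · exact h1 e
          · exact h2 e
          · exact h3 e
        · exact h4 i hi
      · rintro ⟨hy, hall⟩
        have hx := hall x (Or.inl rfl)
        exact ⟨⟨⟨⟨hy, fun e => hx ⟨h, Or.inl e⟩⟩, fun e => hx ⟨h, Or.inr (Or.inl e)⟩⟩,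
          fun e => hx ⟨h, Or.inr (Or.inr e)⟩⟩, fun i hi => hall i (Or.inr hi)⟩
    · rw [if_neg h, ih]
      simp only [pvHit, List.mem_cons]
      constructor
      · rintro ⟨hy, hall⟩
        refine ⟨hy, ?_⟩
        rintro i (rfl | hi)
        · rintro ⟨ha, -⟩; exact ha (not_not.mp h)
        · exact hall i hi
      · rintro ⟨hy, hall⟩
        exact ⟨hy, fun i hi => hall i (Or.inr hi)⟩

-- B's per-candidate predicate says exactly 'no assigned index hits y'.
lemma pvPred_iff (state : List Int) (var y : Int) :
    (!(PySem.Set.contains (PySem.Set.ofList ((pvAssigned state).map (fun x => PySem.List.pyGetD state x 0))) y) &&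
     !(PySem.Set.contains (PySem.Set.ofList ((pvAssigned state).map (fun x => PySem.List.pyGetD state x 0 - x))) (y - var)) &&
     !(PySem.Set.contains (PySem.Set.ofList ((pvAssigned state).map (fun x => PySem.List.pyGetD state x 0 + x))) (y + var))) = true
    ↔ ∀ i ∈ PySem.List.pyRange 0 (state.length : Int) 1, ¬ pvHit state var i y := by
  simp only [Bool.and_eq_true, Bool.not_eq_true', ← Bool.not_eq_true,
    PySem.Set.contains_iff, PySem.Set.mem_ofList, List.mem_map, pvAssigned,
    List.mem_filter, pvHit]
  constructor
  · rintro ⟨⟨h1, h2⟩, h3⟩ i hi ⟨ha, hc⟩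
    have ha' : decide (PySem.List.pyGetD state i 0 ≠ -1) = true := by simpa using ha
    rcases hc with rfl | e | e
    · exact h1 ⟨i, ⟨hi, ha'⟩, rfl⟩
    · exact h2 ⟨i, ⟨hi, ha'⟩, by omega⟩
    · exact h3 ⟨i, ⟨hi, ha'⟩, by omega⟩
  · intro h
    refine ⟨⟨?_, ?_⟩, ?_⟩
    · rintro ⟨i, ⟨hi, ha⟩, rfl⟩
      exact h i hi ⟨by simpa using ha, Or.inl rfl⟩
    · rintro ⟨i, ⟨hi, ha⟩, e⟩
      exact h i hi ⟨by simpa using ha, Or.inr (Or.inl (by omega))⟩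
    · rintro ⟨i, ⟨hi, ha⟩, e⟩
      exact h i hi ⟨by simpa using ha, Or.inr (Or.inr (by omega))⟩

-- A's legal-value count for a variable equals B's three-membership count.
lemma pvCount_eq (state : List Int) (var : Int) :
    ((PySem.Set.len (get_sorted_values state var) : Int)) =
    ((PySem.List.pyRange 0 (state.length : Int) 1).countP (fun num =>
      !(PySem.Set.contains (PySem.Set.ofList ((pvAssigned state).map (fun x => PySem.List.pyGetD state x 0))) num) &&
      !(PySem.Set.contains (PySem.Set.ofList ((pvAssigned state).map (fun x => PySem.List.pyGetD state x 0 - x))) (num - var)) &&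
      !(PySem.Set.contains (PySem.Set.ofList ((pvAssigned state).map (fun x => PySem.List.pyGetD state x 0 + x))) (num + var))) : Int) := by
  have hnd1 : (get_sorted_values state var).Nodup := by
    unfold get_sorted_values
    exact pvFold_nodup state var _ _ (PySem.Set.nodup_ofList _)
  have hnd2 : ((PySem.List.pyRange 0 (state.length : Int) 1).filter (fun num =>
      !(PySem.Set.contains (PySem.Set.ofList ((pvAssigned state).map (fun x => PySem.List.pyGetD state x 0))) num) &&
      !(PySem.Set.contains (PySem.Set.ofList ((pvAssigned state).map (fun x => PySem.List.pyGetD state x 0 - x))) (num - var)) &&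
      !(PySem.Set.contains (PySem.Set.ofList ((pvAssigned state).map (fun x => PySem.List.pyGetD state x 0 + x))) (num + var)))).Nodup :=
    (PySem.List.nodup_pyRange_one 0 (state.length : Int)).filter _
  have hmem : ∀ y, y ∈ get_sorted_values state var ↔
      y ∈ (PySem.List.pyRange 0 (state.length : Int) 1).filter (fun num =>
      !(PySem.Set.contains (PySem.Set.ofList ((pvAssigned state).map (fun x => PySem.List.pyGetD state x 0))) num) &&
      !(PySem.Set.contains (PySem.Set.ofList ((pvAssigned state).map (fun x => PySem.List.pyGetD state x 0 - x))) (num - var)) &&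
      !(PySem.Set.contains (PySem.Set.ofList ((pvAssigned state).map (fun x => PySem.List.pyGetD state x 0 + x))) (num + var))) := by
    intro y
    unfold get_sorted_values
    rw [pvFold_mem, List.mem_filter]
    exact and_congr (by simp) (pvPred_iff state var y).symm
  have hlen := ((List.perm_ext_iff_of_nodup hnd1 hnd2).mpr hmem).length_eq
  rw [List.countP_eq_length_filter]
  simp only [PySem.Set.len]
  exact_mod_cast hlen

-- Generic fold lemma: once both accumulators carry the same 'some' index, the two loop bodies agree.
lemma pvFold_some (state : List Int) (c : Int → Int) (L : List Int) (o : Int) (j : Int) :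
    (L.foldl (fun (acc : Int × Option Int) x =>
      if PySem.List.pyGetD state x 0 = -1 then
        if acc.1 > c x then (c x, some x) else acc
      else acc) (o, some j)) =
    (L.foldl (fun (acc : Int × Option Int) v =>
      if PySem.List.pyGetD state v 0 = -1 then
        let idx := if acc.2 = none then some v else acc.2
        if acc.1 > c v then (c v, some v) else (acc.1, idx)
      else acc) (o, some j)) := by
  induction L generalizing o j with
  | nil => rfl
  | cons x L ih =>
    simp only [List.foldl_cons]
    by_cases h : PySem.List.pyGetD state x 0 = -1
    · simp only [if_pos h]
      by_cases hc : o > c x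
      · simp only [if_pos hc]; exact ih _ _
      · simp only [if_neg hc]; exact ih o j
    · simp only [if_neg h]; exact ih o j

-- A folding from (o, first unassigned of L) equals B folding from (o, none).
lemma pvFold_main (state : List Int) (c : Int → Int) (L : List Int) (o : Int) :
    (L.foldl (fun (acc : Int × Option Int) x =>
      if PySem.List.pyGetD state x 0 = -1 then
        if acc.1 > c x then (c x, some x) else acc
      else acc) (o, pvGnuvLoop state L)) =
    (L.foldl (fun (acc : Int × Option Int) v =>
      if PySem.List.pyGetD state v 0 = -1 then
        let idx := if acc.2 = none then some v else acc.2
        if acc.1 > c v then (c v, some v) else (acc.1, idx)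
      else acc) (o, none)) := by
  induction L generalizing o with
  | nil => rfl
  | cons x L ih =>
    simp only [List.foldl_cons]
    by_cases h : PySem.List.pyGetD state x 0 = -1
    · rw [show pvGnuvLoop state (x :: L) = some x by simp [pvGnuvLoop, h]]
      simp only [if_pos h]
      by_cases hc : o > c x
      · simp only [if_pos hc]; exact pvFold_some state c L (c x) x
      · simp only [if_neg hc]; exact pvFold_some state c L o x
    · rw [show pvGnuvLoop state (x :: L) = pvGnuvLoop state L by simp [pvGnuvLoop, h]]
      simp only [if_neg h]
      exact ih o

-- ===== VERDICT (by name: the statement is the Claim_ definition above) =====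
theorem get_most_constrained_var_spec : Claim_equal_get_most_constrained_var := by
  intro state _
  have h1 := pvFold_main state (fun x => (PySem.Set.len (get_sorted_values state x) : Int))
      (PySem.List.pyRange 0 (state.length : Int) 1) (state.length : Int)
  have h2 := PySem.List.foldl_congr_mem (PySem.List.pyRange 0 (state.length : Int) 1)
      (fun (acc : Int × Option Int) v =>
        if PySem.List.pyGetD state v 0 = -1 then
          let idx := if acc.2 = none then some v else acc.2
          if acc.1 > (PySem.Set.len (get_sorted_values state v) : Int) then
            ((PySem.Set.len (get_sorted_values state v) : Int), some v)
          else (acc.1, idx)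
        else acc)
      (fun (acc : Int × Option Int) v =>
        if PySem.List.pyGetD state v 0 = -1 then
          let idx := if acc.2 = none then some v else acc.2
          let cnt : Int := (PySem.List.pyRange 0 (state.length : Int) 1).countP (fun num =>
            !(PySem.Set.contains (PySem.Set.ofList ((pvAssigned state).map (fun x => PySem.List.pyGetD state x 0))) num) &&
            !(PySem.Set.contains (PySem.Set.ofList ((pvAssigned state).map (fun x => PySem.List.pyGetD state x 0 - x))) (num - v)) &&
            !(PySem.Set.contains (PySem.Set.ofList ((pvAssigned state).map (fun x => PySem.List.pyGetD state x 0 + x))) (num + v)))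
          if acc.1 > cnt then (cnt, some v) else (acc.1, idx)
        else acc)
      ((state.length : Int), none)
      (by
        intro acc v _
        by_cases h : PySem.List.pyGetD state v 0 = -1
        · simp only [if_pos h, pvCount_eq state v]
        · simp only [if_neg h])
  exact congrArg Prod.snd (h1.trans h2)
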